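-- pv_equiv track=rewrite | github.com/KimJaeHwan/lua_callgraph_propagation_agent | scripts/02_score_with_callgraph.py | build_query_adjacency
-- ===== SOURCE A (Python) =====
-- from collections import defaultdict
--
-- def build_query_adjacency(query_graph: dict) -> tuple[dict[str, set[str]], dict[str, set[str]]]:
--     outgoing: dict[str, set[str]] = defaultdict(set)
--     incoming: dict[str, set[str]] = defaultdict(set)
--     for edge in query_graph.get("edges", []):
--         if edge.get("edge_type", "calls") != "calls":
--             continue
--         src = edge.get("src")
--         dst = edge.get("dst")
--         if not src or not dst:
--             continue
--         outgoing[src].add(dst)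
--         incoming[dst].add(src)
--     return outgoing, incoming
-- ===== SOURCE B (Python) =====
-- from collections import defaultdict
--
--
-- def build_query_adjacency(query_graph: dict) -> tuple[dict[str, set[str]], dict[str, set[str]]]:
--     # Key-major gather: extract the kept (src, dst) pairs once, then build each
--     # map declaratively — for every distinct endpoint, one scan collects its
--     # partners as a set comprehension.  No incremental dict/set mutation at all.
--     pairs = [
--         (e.get("src"), e.get("dst"))
--         for e in query_graph.get("edges", [])
--         if e.get("edge_type", "calls") == "calls" and e.get("src") and e.get("dst")
--     ]
--     outgoing = defaultdict(set, {
--         k: {d for s, d in pairs if s == k}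
--         for k in dict.fromkeys(s for s, _ in pairs)
--     })
--     incoming = defaultdict(set, {
--         k: {s for s, d in pairs if d == k}
--         for k in dict.fromkeys(d for _, d in pairs)
--     })
--     return outgoing, incoming
-- ===== Notes on version B (the rewrite author's own statement) =====
-- stated objective: alternative
-- what changed: A scatters each edge into both maps by mutating defaultdicts inside one loop; B extracts the kept (src,dst) pair list once and then builds each map key-major and purely declaratively: for every distinct endpoint (dict.fromkeys order) a comprehension scans the pair list and gathers its partners as a set, with no incremental dict/set mutation.
import Mathlib
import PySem

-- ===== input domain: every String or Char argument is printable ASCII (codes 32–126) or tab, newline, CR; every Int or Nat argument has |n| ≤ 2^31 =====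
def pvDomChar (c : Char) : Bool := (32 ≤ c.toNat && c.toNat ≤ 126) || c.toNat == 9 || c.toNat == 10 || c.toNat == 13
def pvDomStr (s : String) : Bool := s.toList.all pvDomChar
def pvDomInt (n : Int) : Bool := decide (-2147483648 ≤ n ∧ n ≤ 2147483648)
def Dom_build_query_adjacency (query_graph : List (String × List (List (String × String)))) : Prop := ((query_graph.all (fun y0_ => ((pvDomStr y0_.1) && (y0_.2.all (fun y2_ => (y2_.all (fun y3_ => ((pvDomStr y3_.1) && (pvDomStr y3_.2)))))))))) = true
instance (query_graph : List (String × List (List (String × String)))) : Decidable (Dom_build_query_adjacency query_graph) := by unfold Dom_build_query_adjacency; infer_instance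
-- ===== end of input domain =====

-- B replaces A's single edge-major scatter loop (mutating two defaultdicts) by a
-- key-major gather: extract the kept (src, dst) pairs once, then for each distinct
-- endpoint a comprehension scans the pair list and collects its partners (objective: alternative).

-- ===== PORT A =====
-- one iteration of A's loop over the edges, updating (outgoing, incoming)
def pvStepA (st : PySem.Dict String (PySem.Set String) × PySem.Dict String (PySem.Set String))
    (edge : List (String × String)) :
    PySem.Dict String (PySem.Set String) × PySem.Dict String (PySem.Set String) :=
  if (PySem.Dict.mk edge).getD "edge_type" "calls" ≠ "calls" then st
  else
    match (PySem.Dict.mk edge).get? "src", (PySem.Dict.mk edge).get? "dst" with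
    | some src, some dst =>
        if src = "" ∨ dst = "" then st
        else (st.1.modify src [] (fun s => PySem.Set.add s dst),
              st.2.modify dst [] (fun s => PySem.Set.add s src))
    | _, _ => st

def build_query_adjacency (query_graph : List (String × List (List (String × String)))) : (List (String × List String)) × (List (String × List String)) :=
  let edges := (PySem.Dict.mk query_graph).getD "edges" []
  let st := edges.foldl pvStepA (PySem.Dict.empty, PySem.Dict.empty)
  (st.1.items, st.2.items)

-- ===== PORT B =====
-- the filtering comprehension: the kept (src, dst) pair of each 'calls' edge
def pvPairs (edges : List (List (String × String))) : List (String × String) :=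
  edges.filterMap (fun e =>
    if (PySem.Dict.mk e).getD "edge_type" "calls" = "calls" then
      match (PySem.Dict.mk e).get? "src", (PySem.Dict.mk e).get? "dst" with
      | some s, some t => if s ≠ "" ∧ t ≠ "" then some (s, t) else none
      | _, _ => none
    else none)

def build_query_adjacency_alt (query_graph : List (String × List (List (String × String)))) : (List (String × List String)) × (List (String × List String)) :=
  let pairs := pvPairs ((PySem.Dict.mk query_graph).getD "edges" [])
  -- dict comprehension over dict.fromkeys(...) keys; each value a set comprehension
  ((PySem.List.dedup (pairs.map (·.1))).map
      (fun k => (k, PySem.Set.ofList ((pairs.filter (fun p => p.1 == k)).map (·.2)))),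
   (PySem.List.dedup (pairs.map (·.2))).map
      (fun k => (k, PySem.Set.ofList ((pairs.filter (fun p => p.2 == k)).map (·.1)))))

-- ===== PRECONDITION & SPEC =====
def Spec_build_query_adjacency (query_graph : List (String × List (List (String × String)))) (out : (List (String × List String)) × (List (String × List String))) : Prop := out = build_query_adjacency_alt query_graph
instance (query_graph : List (String × List (List (String × String)))) (out : (List (String × List String)) × (List (String × List String))) : Decidable (Spec_build_query_adjacency query_graph out) := by unfold Spec_build_query_adjacency; infer_instance

-- ===== CLAIM (what is proved, stated in full; the proofs are below) =====
def Claim_equal_build_query_adjacency : Prop := ∀ (query_graph : List (String × List (List (String × String)))), Dom_build_query_adjacency query_graph → Spec_build_query_adjacency query_graph (build_query_adjacency query_graph)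

-- ===== LEMMAS AND PROOFS =====

-- the classifier pvPairs applies to a single edge
def pvKeep (edge : List (String × String)) : Option (String × String) :=
  if (PySem.Dict.mk edge).getD "edge_type" "calls" = "calls" then
    match (PySem.Dict.mk edge).get? "src", (PySem.Dict.mk edge).get? "dst" with
    | some s, some t => if s ≠ "" ∧ t ≠ "" then some (s, t) else none
    | _, _ => none
  else none

theorem pvPairs_eq (edges : List (List (String × String))) :
    pvPairs edges = edges.filterMap pvKeep := rfl

-- one step of A acts on the pair of dicts exactly as pvKeep prescribes
theorem pvStepA_eq_keep (st : PySem.Dict String (PySem.Set String) × PySem.Dict String (PySem.Set String))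
    (edge : List (String × String)) :
    pvStepA st edge =
      match pvKeep edge with
      | none => st
      | some p => (st.1.modify p.1 [] (fun s => PySem.Set.add s p.2),
                   st.2.modify p.2 [] (fun s => PySem.Set.add s p.1)) := by
  by_cases he : (PySem.Dict.mk edge).getD "edge_type" "calls" = "calls"
  · cases hs : (PySem.Dict.mk edge).get? "src" with
    | none => simp [pvStepA, pvKeep, he, hs]
    | some s =>
      cases hd : (PySem.Dict.mk edge).get? "dst" with
      | none => simp [pvStepA, pvKeep, he, hs, hd]
      | some t =>
        by_cases h1 : s = "" <;> by_cases h2 : t = "" <;>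
          simp [pvStepA, pvKeep, he, hs, hd, h1, h2]
  · simp [pvStepA, pvKeep, he]

-- A's interleaved loop is, componentwise, a scatter fold over the kept pairs
theorem foldl_stepA_eq (edges : List (List (String × String)))
    (o i : PySem.Dict String (PySem.Set String)) :
    edges.foldl pvStepA (o, i) =
      ((edges.filterMap pvKeep).foldl
          (fun d p => d.modify p.1 [] (fun s => PySem.Set.add s p.2)) o,
       (edges.filterMap pvKeep).foldl
          (fun d p => d.modify p.2 [] (fun s => PySem.Set.add s p.1)) i) := by
  induction edges generalizing o i with
  | nil => simp
  | cons e rest ih =>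
    rw [List.foldl_cons, pvStepA_eq_keep]
    cases h : pvKeep e with
    | none => simp [h, ih]
    | some p => simp [h, ih]

-- value at a key of the scatter fold = the gathered partners, as a Set.update
theorem getD_scatter (ps : List (String × String)) (d : PySem.Dict String (PySem.Set String))
    (key : (String × String) → String) (val : (String × String) → String) (k : String) :
    (ps.foldl (fun d p => d.modify (key p) [] (fun s => PySem.Set.add s (val p))) d).getD k []
      = PySem.Set.update (d.getD k []) ((ps.filter (fun p => key p == k)).map val) := by
  induction ps generalizing d with
  | nil => simp [PySem.Set.update]
  | cons p rest ih =>
    rw [List.foldl_cons, ih]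
    by_cases h : key p = k
    · subst h
      rw [PySem.Dict.getD_modify_self]
      simp [PySem.Set.update_cons]
    · have h' : ¬ k = key p := fun hh => h hh.symm
      simp [PySem.Dict.getD_modify, h, h']

-- the scatter fold as an items list: keys in first-occurrence order, gathered values
theorem items_scatter (ps : List (String × String))
    (key : (String × String) → String) (val : (String × String) → String) :
    (ps.foldl (fun d p => d.modify (key p) [] (fun s => PySem.Set.add s (val p)))
        (PySem.Dict.empty : PySem.Dict String (PySem.Set String))).items
      = (PySem.List.dedup (ps.map key)).map
          (fun k => (k, PySem.Set.ofList ((ps.filter (fun p => key p == k)).map val))) := by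
  have hnd : (ps.foldl (fun d p => d.modify (key p) [] (fun s => PySem.Set.add s (val p)))
      (PySem.Dict.empty : PySem.Dict String (PySem.Set String))).keys.Nodup :=
    PySem.Dict.nodup_keys_foldl_modify_key _ _ _ _ _ (by simp)
  rw [PySem.Dict.items_eq_map_keys _ hnd []]
  rw [PySem.Dict.keys_foldl_modify_key]
  simp only [PySem.Dict.keys_empty, PySem.Set.update_nil_left, PySem.List.dedup_eq_ofList]
  refine List.map_congr_left (fun k hk => ?_)
  rw [getD_scatter]
  simp [PySem.Dict.getD_empty, PySem.Set.update_nil_left]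

-- ===== VERDICT (by name: the statement is the Claim_ definition above) =====
theorem build_query_adjacency_spec : Claim_equal_build_query_adjacency := by
  intro qg _
  unfold Spec_build_query_adjacency build_query_adjacency build_query_adjacency_alt
  dsimp only
  rw [pvPairs_eq, foldl_stepA_eq]
  exact Prod.ext (items_scatter _ (·.1) (·.2)) (items_scatter _ (·.2) (·.1))
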